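-- pv_equiv track=rewrite | github.com/Yashwant-Tailor/LeetCodeSolution | python_solutions/2512.py | get_report_type
-- ===== SOURCE A (Python) =====
-- def get_report_type(report,p_feedback,n_feedback):
--     words = report.split(' ')
--     points = 0
--     for word in words:
--         if word in p_feedback:
--             points += 3
--         elif word in n_feedback:
--             points -= 1
--     return points
-- ===== SOURCE B (Python) =====
-- def get_report_type(report, p_feedback, n_feedback):
--     # Inverted traversal: count report words once, then iterate over the
--     # feedback SETS, closed form 3*(positive hits) - (strictly negative hits).
--     counts = {}
--     for w in report.split(' '):
--         counts[w] = counts.get(w, 0) + 1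
--     pos = set(p_feedback)
--     neg = set(n_feedback) - pos   # elif priority: a word in both scores +3
--     return 3 * sum(counts.get(w, 0) for w in pos) - sum(counts.get(w, 0) for w in neg)
-- ===== Notes on version B (the rewrite author's own statement) =====
-- stated objective: alternative
-- what changed: B inverts the traversal: it builds a counter of report words once, then iterates over the two feedback sets (negatives minus positives, matching A's elif priority) and returns the closed form 3*positive_hits - negative_hits, instead of A's per-report-word two-branch membership scan.
import Mathlib
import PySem

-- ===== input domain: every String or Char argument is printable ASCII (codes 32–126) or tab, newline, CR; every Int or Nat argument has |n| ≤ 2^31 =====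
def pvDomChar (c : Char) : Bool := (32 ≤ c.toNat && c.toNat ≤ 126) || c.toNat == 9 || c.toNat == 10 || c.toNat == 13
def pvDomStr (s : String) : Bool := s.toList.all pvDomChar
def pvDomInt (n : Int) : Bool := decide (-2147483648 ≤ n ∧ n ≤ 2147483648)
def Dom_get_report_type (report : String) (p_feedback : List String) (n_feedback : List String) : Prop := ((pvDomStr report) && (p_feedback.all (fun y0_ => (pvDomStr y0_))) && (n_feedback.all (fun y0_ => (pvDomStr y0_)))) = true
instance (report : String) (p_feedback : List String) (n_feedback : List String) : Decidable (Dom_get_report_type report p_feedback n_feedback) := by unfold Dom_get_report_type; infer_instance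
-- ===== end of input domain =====

-- B inverts the traversal: it counts report words once, then iterates over the feedback SETS
-- (set(n)-set(p) for A's elif priority) and returns 3*positive_hits - negative_hits; objective: alternative.

-- ===== PORT A =====
def get_report_type (report : String) (p_feedback : List String) (n_feedback : List String) : Int :=
  ((PySem.Chars.splitOn report.toList [' ']).map String.ofList).foldl
    (fun points word =>
      if word ∈ p_feedback then points + 3
      else if word ∈ n_feedback then points - 1
      else points) 0

-- ===== PORT B =====
def get_report_type_alt (report : String) (p_feedback : List String) (n_feedback : List String) : Int :=
  let counts : PySem.Dict String Int :=
    PySem.Dict.counter ((PySem.Chars.splitOn report.toList [' ']).map String.ofList)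
  let pos : PySem.Set String := PySem.Set.ofList p_feedback
  let neg : PySem.Set String := PySem.Set.diff (PySem.Set.ofList n_feedback) pos
  3 * (pos.map (fun w => counts.getD w 0)).sum - (neg.map (fun w => counts.getD w 0)).sum

-- ===== PRECONDITION & SPEC =====
def Spec_get_report_type (report : String) (p_feedback : List String) (n_feedback : List String) (out : Int) : Prop := out = get_report_type_alt report p_feedback n_feedback
instance (report : String) (p_feedback : List String) (n_feedback : List String) (out : Int) : Decidable (Spec_get_report_type report p_feedback n_feedback out) := by unfold Spec_get_report_type; infer_instance

-- ===== CLAIM (what is proved, stated in full; the proofs are below) =====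
def Claim_equal_get_report_type : Prop := ∀ (report : String) (p_feedback : List String) (n_feedback : List String), Dom_get_report_type report p_feedback n_feedback → Spec_get_report_type report p_feedback n_feedback (get_report_type report p_feedback n_feedback)

-- ===== LEMMAS AND PROOFS =====

-- summing occurrence counts over a duplicate-free list of keys counts the members of ws that lie in l
lemma sum_count_cons (x : String) (ws l : List String) (hl : l.Nodup) :
    (l.map (fun w => (((x :: ws).count w : Nat) : Int))).sum
      = (l.map (fun w => (ws.count w : Int))).sum + (if x ∈ l then 1 else 0) := by
  induction l with
  | nil => simp
  | cons a l ihl =>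
      have hl' : l.Nodup := hl.of_cons
      simp only [List.map_cons, List.sum_cons, List.mem_cons]
      rw [ihl hl']
      by_cases hax : x = a
      · subst hax
        have : x ∉ l := (List.nodup_cons.mp hl).1
        simp [this]
        ring
      · simp [hax]
        split_ifs <;> ring

-- summing occurrence counts over a duplicate-free list of keys counts the members of ws that lie in l
lemma sum_count_nodup (ws l : List String) (hl : l.Nodup) :
    (l.map (fun w => (ws.count w : Int))).sum = (ws.countP (· ∈ l) : Int) := by
  induction ws with
  | nil => simp
  | cons x ws ih =>
      rw [sum_count_cons x ws l hl, ih]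
      by_cases h : x ∈ l <;> simp [h]

-- A's fold computed in closed form
lemma foldA (p n : List String) (ws : List String) (acc : Int) :
    ws.foldl (fun points word =>
      if word ∈ p then points + 3
      else if word ∈ n then points - 1
      else points) acc
    = acc + 3 * (ws.countP (· ∈ p) : Int) - (ws.countP (fun w => w ∈ n ∧ w ∉ p) : Int) := by
  induction ws generalizing acc with
  | nil => simp
  | cons x ws ih =>
      simp only [List.foldl_cons, ih, List.countP_cons]
      by_cases hp : x ∈ p <;> by_cases hn : x ∈ n <;>
        simp [hp, hn] <;> ring

-- ===== VERDICT (by name: the statement is the Claim_ definition above) =====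
theorem get_report_type_spec : Claim_equal_get_report_type := by
  intro report p_feedback n_feedback _
  unfold Spec_get_report_type get_report_type get_report_type_alt
  set ws := (PySem.Chars.splitOn report.toList [' ']).map String.ofList with hws
  simp only [PySem.Dict.getD_counter]
  rw [foldA]
  rw [sum_count_nodup ws _ (PySem.Set.nodup_ofList p_feedback),
      sum_count_nodup ws _ (PySem.Set.nodup_diff _ _ (PySem.Set.nodup_ofList n_feedback))]
  have h1 : ws.countP (· ∈ PySem.Set.ofList p_feedback) = ws.countP (· ∈ p_feedback) := by
    apply List.countP_congr; intro w _; simp [PySem.Set.mem_ofList]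
  have h2 : ws.countP (· ∈ PySem.Set.diff (PySem.Set.ofList n_feedback) (PySem.Set.ofList p_feedback))
      = ws.countP (fun w => w ∈ n_feedback ∧ w ∉ p_feedback) := by
    apply List.countP_congr; intro w _
    simp [PySem.Set.mem_diff, PySem.Set.mem_ofList]
  rw [h1, h2]; ring
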